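-- pv_equiv track=rewrite | github.com/Owen-Richards/ai-nutritionist | src/services/meal_planning/rule_engine.py | _supports_diet
-- ===== SOURCE A (Python) =====
-- from typing import Dict, Iterable, List
--
-- def _supports_diet(meal: Dict[str, object], diet: str | None) -> bool:
--     if not diet or diet.lower() in {"any", "omnivore"}:
--         return True
--     tags = {tag.lower() for tag in meal.get("tags", [])}
--     diet_lower = diet.lower()
--     if diet_lower == "vegetarian":
--         return "vegetarian" in tags or "vegan" in tags
--     if diet_lower == "vegan":
--         return "vegan" in tags
--     if diet_lower == "pescatarian":
--         return "pescatarian" in tags or "seafood" in tags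
--     if diet_lower in {"gluten_free", "gluten-free"}:
--         return "gluten_free" in tags
--     if diet_lower == "mediterranean":
--         return "mediterranean" in tags or "vegetarian" in tags or "pescatarian" in tags
--     return True
-- ===== SOURCE B (Python) =====
-- _RESTRICTED = {"vegetarian", "vegan", "pescatarian", "gluten_free", "gluten-free", "mediterranean"}
--
-- # Inverted index: for each meal tag, the set of restricted diets that tag satisfies.
-- _DIETS_SATISFIED_BY_TAG = {
--     "vegetarian": {"vegetarian", "mediterranean"},
--     "vegan": {"vegan", "vegetarian"},
--     "pescatarian": {"pescatarian", "mediterranean"},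
--     "seafood": {"pescatarian"},
--     "gluten_free": {"gluten_free", "gluten-free"},
--     "mediterranean": {"mediterranean"},
-- }
--
--
-- def _supports_diet(meal, diet):
--     if not diet or diet.lower() in {"any", "omnivore"}:
--         return True
--     dl = diet.lower()
--     if dl not in _RESTRICTED:
--         return True
--     for tag in meal.get("tags", []):
--         if dl in _DIETS_SATISFIED_BY_TAG.get(tag.lower(), ()):
--             return True
--     return False
-- ===== Notes on version B (the rewrite author's own statement) =====
-- stated objective: alternative
-- what changed: B inverts the direction of the check: instead of building a lowercased tag set and testing the diet's acceptable tags against it branch by branch, B scans the meal's tags once with an inverted tag-to-diets index and returns as soon as some tag's satisfied-diet set contains the diet.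
import Mathlib
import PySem

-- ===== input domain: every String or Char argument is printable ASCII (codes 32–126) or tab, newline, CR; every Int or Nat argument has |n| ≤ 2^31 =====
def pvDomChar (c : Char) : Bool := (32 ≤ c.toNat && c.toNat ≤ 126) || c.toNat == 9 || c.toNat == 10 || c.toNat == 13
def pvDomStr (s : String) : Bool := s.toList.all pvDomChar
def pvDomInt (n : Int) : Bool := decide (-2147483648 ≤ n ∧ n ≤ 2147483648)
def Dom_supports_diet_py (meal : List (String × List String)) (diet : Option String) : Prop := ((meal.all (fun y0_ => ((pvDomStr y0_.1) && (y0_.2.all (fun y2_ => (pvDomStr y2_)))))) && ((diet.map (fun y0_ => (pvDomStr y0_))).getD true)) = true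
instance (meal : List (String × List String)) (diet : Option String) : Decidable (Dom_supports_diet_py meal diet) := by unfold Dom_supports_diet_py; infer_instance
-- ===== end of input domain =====

-- B inverts the check: it scans the meal's tags once with an inverted tag→satisfied-diets
-- index and succeeds on the first tag satisfying the diet, instead of A's building a tag
-- set and testing the diet's acceptable tags branch by branch (objective: alternative).

-- ===== PORT A =====
def supports_diet_py (meal : List (String × List String)) (diet : Option String) : Bool :=
  match diet with
  | none => true
  | some d =>
    if d = "" ∨ PySem.Str.lower d = "any" ∨ PySem.Str.lower d = "omnivore" then true
    else
      let tags : PySem.Set String :=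
        PySem.Set.ofList (((PySem.Dict.mk meal).getD "tags" []).map PySem.Str.lower)
      let diet_lower := PySem.Str.lower d
      if diet_lower = "vegetarian" then
        tags.contains "vegetarian" || tags.contains "vegan"
      else if diet_lower = "vegan" then
        tags.contains "vegan"
      else if diet_lower = "pescatarian" then
        tags.contains "pescatarian" || tags.contains "seafood"
      else if diet_lower = "gluten_free" ∨ diet_lower = "gluten-free" then
        tags.contains "gluten_free"
      else if diet_lower = "mediterranean" then
        tags.contains "mediterranean" || tags.contains "vegetarian" || tags.contains "pescatarian"
      else true

-- ===== PORT B =====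
def pvRestricted : PySem.Set String :=
  PySem.Set.ofList ["vegetarian", "vegan", "pescatarian", "gluten_free", "gluten-free", "mediterranean"]

-- Inverted index: for each meal tag, the set of restricted diets that tag satisfies.
def pvDietsSatisfiedByTag : PySem.Dict String (PySem.Set String) :=
  PySem.Dict.ofList
    [("vegetarian", PySem.Set.ofList ["vegetarian", "mediterranean"]),
     ("vegan", PySem.Set.ofList ["vegan", "vegetarian"]),
     ("pescatarian", PySem.Set.ofList ["pescatarian", "mediterranean"]),
     ("seafood", PySem.Set.ofList ["pescatarian"]),
     ("gluten_free", PySem.Set.ofList ["gluten_free", "gluten-free"]),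
     ("mediterranean", PySem.Set.ofList ["mediterranean"])]

def supports_diet_py_alt (meal : List (String × List String)) (diet : Option String) : Bool :=
  match diet with
  | none => true
  | some d =>
    if d = "" ∨ PySem.Str.lower d = "any" ∨ PySem.Str.lower d = "omnivore" then true
    else
      let dl := PySem.Str.lower d
      if ¬ pvRestricted.contains dl then true
      else
        -- 'for tag in …: if dl in index.get(tag.lower(), ()): return True' / 'return False'
        ((PySem.Dict.mk meal).getD "tags" []).any
          (fun tag => (pvDietsSatisfiedByTag.getD (PySem.Str.lower tag) PySem.Set.empty).contains dl)

-- ===== PRECONDITION & SPEC =====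
def Spec_supports_diet_py (meal : List (String × List String)) (diet : Option String) (out : Bool) : Prop := out = supports_diet_py_alt meal diet
instance (meal : List (String × List String)) (diet : Option String) (out : Bool) : Decidable (Spec_supports_diet_py meal diet out) := by unfold Spec_supports_diet_py; infer_instance

-- ===== CLAIM =====
def Claim_equal_supports_diet_py : Prop := ∀ (meal : List (String × List String)) (diet : Option String), Dom_supports_diet_py meal diet → Spec_supports_diet_py meal diet (supports_diet_py meal diet)

-- ===== LEMMAS AND PROOFS =====

-- A's "c1 in tags or … or ck in tags" (tags = set of lowered tags) equals B's single scan
-- of the raw tag list testing 'lower tag ∈ cs'.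
theorem any_mem_lowered (tl : List String) (cs : List String) :
    cs.any (fun c => PySem.Set.contains (PySem.Set.ofList (tl.map PySem.Str.lower)) c)
      = tl.any (fun t => cs.contains (PySem.Str.lower t)) := by
  rw [Bool.eq_iff_iff]
  simp only [List.any_eq_true, PySem.Set.contains_iff, PySem.Set.mem_ofList,
    List.mem_map, List.contains_iff_mem]
  constructor
  · rintro ⟨c, hc, t, ht, rfl⟩; exact ⟨t, ht, hc⟩
  · rintro ⟨t, ht, hc⟩; exact ⟨_, hc, t, ht, rfl⟩

-- Pointwise characterisation of the inverted index: for each restricted diet dl,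
-- 'dl ∈ index.get(s, ∅)' iff s is one of the tags that satisfy dl.
theorem index_mk : pvDietsSatisfiedByTag = PySem.Dict.mk
    [("vegetarian", ["vegetarian", "mediterranean"]),
     ("vegan", ["vegan", "vegetarian"]),
     ("pescatarian", ["pescatarian", "mediterranean"]),
     ("seafood", ["pescatarian"]),
     ("gluten_free", ["gluten_free", "gluten-free"]),
     ("mediterranean", ["mediterranean"])] := by decide

theorem sat_veg (s : String) :
    (pvDietsSatisfiedByTag.getD s PySem.Set.empty).contains "vegetarian"
      = ((["vegetarian", "vegan"] : List String).contains s) := by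
  rw [index_mk]
  simp only [PySem.Dict.getD, PySem.Dict.get?_mk_cons]
  split_ifs <;> simp_all [PySem.Dict.get?] <;> subst_vars <;>
    first | decide | (and_intros <;> intro h <;> subst h <;> simp_all)

theorem sat_vgn (s : String) :
    (pvDietsSatisfiedByTag.getD s PySem.Set.empty).contains "vegan"
      = ((["vegan"] : List String).contains s) := by
  rw [index_mk]
  simp only [PySem.Dict.getD, PySem.Dict.get?_mk_cons]
  split_ifs <;> simp_all [PySem.Dict.get?] <;> subst_vars <;>
    first | decide | (and_intros <;> intro h <;> subst h <;> simp_all)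

theorem sat_pes (s : String) :
    (pvDietsSatisfiedByTag.getD s PySem.Set.empty).contains "pescatarian"
      = ((["pescatarian", "seafood"] : List String).contains s) := by
  rw [index_mk]
  simp only [PySem.Dict.getD, PySem.Dict.get?_mk_cons]
  split_ifs <;> simp_all [PySem.Dict.get?] <;> subst_vars <;>
    first | decide | (and_intros <;> intro h <;> subst h <;> simp_all)

theorem sat_gf (s : String) :
    (pvDietsSatisfiedByTag.getD s PySem.Set.empty).contains "gluten_free"
      = ((["gluten_free"] : List String).contains s) := by
  rw [index_mk]
  simp only [PySem.Dict.getD, PySem.Dict.get?_mk_cons]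
  split_ifs <;> simp_all [PySem.Dict.get?] <;> subst_vars <;>
    first | decide | (and_intros <;> intro h <;> subst h <;> simp_all)

theorem sat_gfd (s : String) :
    (pvDietsSatisfiedByTag.getD s PySem.Set.empty).contains "gluten-free"
      = ((["gluten_free"] : List String).contains s) := by
  rw [index_mk]
  simp only [PySem.Dict.getD, PySem.Dict.get?_mk_cons]
  split_ifs <;> simp_all [PySem.Dict.get?] <;> subst_vars <;>
    first | decide | (and_intros <;> intro h <;> subst h <;> simp_all)

theorem sat_med (s : String) :
    (pvDietsSatisfiedByTag.getD s PySem.Set.empty).contains "mediterranean"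
      = ((["mediterranean", "vegetarian", "pescatarian"] : List String).contains s) := by
  rw [index_mk]
  simp only [PySem.Dict.getD, PySem.Dict.get?_mk_cons]
  split_ifs <;> simp_all [PySem.Dict.get?] <;> subst_vars <;>
    first | decide | (and_intros <;> intro h <;> subst h <;> simp_all)

theorem supports_diet_py_spec : Claim_equal_supports_diet_py := by
  intro meal diet _
  unfold Spec_supports_diet_py supports_diet_py supports_diet_py_alt
  cases diet with
  | none => rfl
  | some d =>
    by_cases h0 : d = "" ∨ PySem.Str.lower d = "any" ∨ PySem.Str.lower d = "omnivore"
    · simp only [if_pos h0]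
    · simp only [if_neg h0]
      generalize (PySem.Dict.mk meal).getD "tags" [] = tl
      generalize PySem.Str.lower d = dl
      have hB : ∀ (cs : List String),
          (∀ s, (pvDietsSatisfiedByTag.getD s PySem.Set.empty).contains dl = cs.contains s) →
          tl.any (fun t => (pvDietsSatisfiedByTag.getD (PySem.Str.lower t) PySem.Set.empty).contains dl)
            = tl.any (fun t => cs.contains (PySem.Str.lower t)) := by
        intro cs h
        exact congrArg tl.any (funext fun t => h (PySem.Str.lower t))
      by_cases h1 : dl = "vegetarian"
      · subst h1
        rw [if_pos rfl]
        rw [if_neg (by decide), hB ["vegetarian", "vegan"] (fun s => sat_veg s), ← any_mem_lowered]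
        simp [List.any]
      rw [if_neg h1]
      by_cases h2 : dl = "vegan"
      · subst h2
        rw [if_pos rfl]
        rw [if_neg (by decide), hB ["vegan"] (fun s => sat_vgn s), ← any_mem_lowered]
        simp [List.any]
      rw [if_neg h2]
      by_cases h3 : dl = "pescatarian"
      · subst h3
        rw [if_pos rfl]
        rw [if_neg (by decide), hB ["pescatarian", "seafood"] (fun s => sat_pes s), ← any_mem_lowered]
        simp [List.any]
      rw [if_neg h3]
      by_cases h4a : dl = "gluten_free"
      · subst h4a
        rw [if_pos (Or.inl rfl)]
        rw [if_neg (by decide), hB ["gluten_free"] (fun s => sat_gf s), ← any_mem_lowered]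
        simp [List.any]
      by_cases h4b : dl = "gluten-free"
      · subst h4b
        rw [if_pos (Or.inr rfl)]
        rw [if_neg (by decide), hB ["gluten_free"] (fun s => sat_gfd s), ← any_mem_lowered]
        simp [List.any]
      rw [if_neg (by exact fun h => h.elim h4a h4b)]
      by_cases h5 : dl = "mediterranean"
      · subst h5
        rw [if_pos rfl]
        rw [if_neg (by decide), hB ["mediterranean", "vegetarian", "pescatarian"] (fun s => sat_med s), ← any_mem_lowered]
        simp [List.any, Bool.or_assoc]
      rw [if_neg h5]
      have hnr : ¬ pvRestricted.contains dl = true := by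
        simp only [pvRestricted, PySem.Set.contains_iff, PySem.Set.mem_ofList, List.mem_cons, List.not_mem_nil, or_false]
        rintro (h | h | h | h | h | h) <;> simp_all
      rw [if_pos hnr]
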